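-- pv_equiv track=rewrite | github.com/RexOdonata/InfArmyOverlap | main.py | createSetID
-- ===== SOURCE A (Python) =====
-- def createSetID(factionMask):
--
--     counter = len(factionMask)-1
--
--     sum = 0
--
--     for val in factionMask:
--
--         if val > 0 :
--
--             sum += 2**counter
--
--         counter-=1
--
--     return sum
-- ===== SOURCE B (Python) =====
-- def createSetID(factionMask):
--     if not factionMask:
--         return 0
--     bits = ''.join('1' if v > 0 else '0' for v in factionMask)
--     return int(bits, 2)
-- ===== Notes on version B (the rewrite author's own statement) =====
-- stated objective: idiomatic
-- what changed: B builds the binary string of the mask ('1' for positive entries, '0' otherwise, most significant first) and obtains the value with one base-2 parse int(bits, 2), instead of A's descending counter and element-wise accumulation of powers of two.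
import Mathlib
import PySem

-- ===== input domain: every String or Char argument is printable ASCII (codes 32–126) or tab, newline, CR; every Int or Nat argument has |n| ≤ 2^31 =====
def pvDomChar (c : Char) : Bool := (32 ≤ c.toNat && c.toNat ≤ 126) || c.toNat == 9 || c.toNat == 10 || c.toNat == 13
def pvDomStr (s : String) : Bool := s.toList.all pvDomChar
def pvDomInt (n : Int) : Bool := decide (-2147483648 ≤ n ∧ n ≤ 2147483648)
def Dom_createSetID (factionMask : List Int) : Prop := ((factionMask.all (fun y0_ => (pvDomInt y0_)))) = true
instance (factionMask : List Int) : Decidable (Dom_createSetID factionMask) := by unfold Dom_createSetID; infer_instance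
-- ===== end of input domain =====

-- B builds the binary string of the mask and parses it once in base 2 (idiomatic); A accumulates powers of two with a descending counter.

-- ===== PORT A =====
-- loop state is (counter, sum); 2**counter uses counter.toNat, exact since the
-- counter is ≥ 0 whenever an element is read (it runs len-1 down to 0).
def createSetID (factionMask : List Int) : Int :=
  (factionMask.foldl
    (fun (st : Int × Int) val =>
      (st.1 - 1, if val > 0 then st.2 + 2 ^ st.1.toNat else st.2))
    ((factionMask.length : Int) - 1, 0)).2

-- ===== PORT B =====
-- int(bits, 2) ported by hand as the base-2 left fold; exact here since every
-- character of bits is '0' or '1' by construction.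
def createSetID_alt (factionMask : List Int) : Int :=
  if factionMask = [] then 0
  else
    let bits : List Char := factionMask.map (fun v => if v > 0 then '1' else '0')
    bits.foldl (fun a c => 2 * a + (if c = '1' then (1 : Int) else 0)) 0

-- ===== PRECONDITION & SPEC =====
def Spec_createSetID (factionMask : List Int) (out : Int) : Prop := out = createSetID_alt factionMask
instance (factionMask : List Int) (out : Int) : Decidable (Spec_createSetID factionMask out) := by unfold Spec_createSetID; infer_instance

-- ===== CLAIM (what is proved, stated in full; the proofs are below) =====
def Claim_equal_createSetID : Prop := ∀ (factionMask : List Int), Dom_createSetID factionMask → Spec_createSetID factionMask (createSetID factionMask)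

-- ===== LEMMAS AND PROOFS =====

-- base-2 parse fold with an arbitrary accumulator
theorem pv_parse_shift (cs : List Char) (a : Int) :
    cs.foldl (fun a c => 2 * a + (if c = '1' then (1 : Int) else 0)) a
      = a * 2 ^ cs.length + cs.foldl (fun a c => 2 * a + (if c = '1' then (1 : Int) else 0)) 0 := by
  induction cs generalizing a with
  | nil => simp
  | cons c t ih =>
    simp only [List.foldl_cons, List.length_cons]
    rw [ih (2 * a + _), ih (2 * 0 + _)]
    ring

-- A's loop starting at counter = len l - 1 adds exactly B's base-2 value
theorem pv_loop_eq (l : List Int) (s : Int) :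
    (l.foldl
      (fun (st : Int × Int) val =>
        (st.1 - 1, if val > 0 then st.2 + 2 ^ st.1.toNat else st.2))
      ((l.length : Int) - 1, s)).2
    = s + (l.map (fun v => if v > 0 then '1' else '0')).foldl
        (fun a c => 2 * a + (if c = '1' then (1 : Int) else 0)) 0 := by
  induction l generalizing s with
  | nil => simp
  | cons v t ih =>
    have hc : ((↑(v :: t).length : Int) - 1) = (t.length : Int) := by
      simp
    have hn : ((↑(v :: t).length : Int) - 1).toNat = t.length := by
      rw [hc]; exact Int.toNat_natCast _
    have hb := pv_parse_shift (List.map (fun v => if v > 0 then '1' else '0') t)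
      (2 * 0 + (if (if v > 0 then '1' else '0') = '1' then (1 : Int) else 0))
    simp only [List.foldl_cons, List.map_cons, hc]
    rw [ih, hb]
    by_cases h : v > 0
    · simp [h]; ring
    · simp [h]

-- ===== VERDICT (by name: the statement is the Claim_ definition above) =====
theorem createSetID_spec : Claim_equal_createSetID := by
  intro l _
  show createSetID l = createSetID_alt l
  unfold createSetID createSetID_alt
  rcases l with _ | ⟨v, t⟩
  · simp
  · rw [pv_loop_eq]
    simp
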